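-- pv_equiv track=rewrite | github.com/LithiumXoul/Bracu-CSE-221 | Assignment_3/B.py | sum_max
-- ===== SOURCE A (Python) =====
-- def linear_max(arr):
--     if len(arr) == 1:
--         return arr[0]
--
--     mid = len(arr) // 2
--     l = linear_max(arr[:mid])
--     r = linear_max(arr[mid:])
--
--     if l > r: return l
--     else: return r
--
-- def square_max(arr):
--     if len(arr) == 1: return arr[0] ** 2
--
--     mid = len(arr) // 2
--     l = square_max(arr[:mid])
--     r = square_max(arr[mid:])
--
--     if l > r: return l
--     else: return r
--
-- def sum_max(arr):
--     if len(arr) == 1: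
--         return None
--
--     mid = len(arr) // 2
--     l_sum_max = sum_max(arr[:mid])
--     r_sum_max = sum_max(arr[mid:])
--
--     l_linear_max = linear_max(arr[:mid])
--     r_square_max = square_max(arr[mid:])
--
--
--     cross_max_sum = l_linear_max + r_square_max
--
--     if l_sum_max == None: l_sum_max = float('-inf')
--     if r_sum_max == None: r_sum_max = float('-inf')
--
--     return max(cross_max_sum, l_sum_max, r_sum_max)
-- ===== SOURCE B (Python) =====
-- def sum_max(arr):
--     # One linear pass: best over j of (max of arr[0..j-1]) + arr[j]**2.
--     if len(arr) < 2:
--         return None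
--     best = None
--     pref = arr[0]
--     for x in arr[1:]:
--         c = pref + x * x
--         best = c if best is None or c > best else best
--         pref = x if x > pref else pref
--     return best
-- ===== Notes on version B (the rewrite author's own statement) =====
-- stated objective: faster
-- what changed: Replaced the three interleaved divide-and-conquer recursions (sum_max/linear_max/square_max, each re-slicing the array) by a single left-to-right pass that keeps a running prefix maximum and the best prefix-max + x^2 value seen so far.
import Mathlib
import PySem

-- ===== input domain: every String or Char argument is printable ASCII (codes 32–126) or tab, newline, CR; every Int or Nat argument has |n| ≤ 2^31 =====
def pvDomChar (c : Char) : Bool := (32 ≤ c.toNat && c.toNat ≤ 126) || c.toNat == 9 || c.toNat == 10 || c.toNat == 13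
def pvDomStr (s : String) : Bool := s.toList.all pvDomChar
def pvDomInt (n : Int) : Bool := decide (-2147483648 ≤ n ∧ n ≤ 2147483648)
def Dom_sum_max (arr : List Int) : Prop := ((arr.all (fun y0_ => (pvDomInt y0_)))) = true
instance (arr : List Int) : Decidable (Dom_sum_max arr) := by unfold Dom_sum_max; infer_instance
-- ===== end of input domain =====

-- B replaces A's three divide-and-conquer recursions by one linear pass (running prefix max); equivalence is proved for nonempty input (A raises on []).

-- ===== PORT A =====
-- Python's linear_max/square_max/sum_max recurse forever on []; the `length = 0` guards below
-- only make the definitions total — [] is excluded by Pre_sum_max.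
def linear_max (arr : List Int) : Int :=
  if arr.length = 1 then arr.headD 0
  else if arr.length = 0 then 0
  else
    let mid := PySem.Int.floordiv (PySem.List.len arr) 2
    let l := linear_max (PySem.List.slice arr none (some mid))
    let r := linear_max (PySem.List.slice arr (some mid) none)
    if l > r then l else r
termination_by arr.length
decreasing_by
  all_goals
    simp only [PySem.List.len_eq] at *
    rw [PySem.Int.floordiv_eq_ediv_of_pos (by norm_num)]
    first
      | rw [PySem.List.slice_to _ (by omega)]
      | rw [PySem.List.slice_from _ (by omega)]
    simp
    omega

def square_max (arr : List Int) : Int :=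
  if arr.length = 1 then (arr.headD 0) ^ 2
  else if arr.length = 0 then 0
  else
    let mid := PySem.Int.floordiv (PySem.List.len arr) 2
    let l := square_max (PySem.List.slice arr none (some mid))
    let r := square_max (PySem.List.slice arr (some mid) none)
    if l > r then l else r
termination_by arr.length
decreasing_by
  all_goals
    simp only [PySem.List.len_eq] at *
    rw [PySem.Int.floordiv_eq_ediv_of_pos (by norm_num)]
    first
      | rw [PySem.List.slice_to _ (by omega)]
      | rw [PySem.List.slice_from _ (by omega)]
    simp
    omega

def sum_max (arr : List Int) : Option Int :=
  if arr.length = 1 then none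
  else if arr.length = 0 then none
  else
    let mid := PySem.Int.floordiv (PySem.List.len arr) 2
    let left := PySem.List.slice arr none (some mid)
    let right := PySem.List.slice arr (some mid) none
    let l_sum_max := sum_max left
    let r_sum_max := sum_max right
    let l_linear_max := linear_max left
    let r_square_max := square_max right
    let cross_max_sum := l_linear_max + r_square_max
    -- max(cross, l_sum_max, r_sum_max) with None replaced by -inf: exact on Int,
    -- since cross_max_sum is a finite int dominating -inf.
    let m1 := match l_sum_max with | none => cross_max_sum | some v => max cross_max_sum v
    some (match r_sum_max with | none => m1 | some v => max m1 v)
termination_by arr.length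
decreasing_by
  all_goals
    simp only [PySem.List.len_eq] at *
    rw [PySem.Int.floordiv_eq_ediv_of_pos (by norm_num)]
    first
      | rw [PySem.List.slice_to _ (by omega)]
      | rw [PySem.List.slice_from _ (by omega)]
    simp
    omega

-- ===== PORT B =====
-- the loop `for x in arr[1:]`, carrying (pref, best)
def sumGo : List Int → Int → Option Int → Option Int
  | [], _, best => best
  | x :: xs, pref, best =>
      let c := pref + x * x
      let best' := match best with | none => c | some b => if c > b then c else b
      let pref' := if x > pref then x else pref
      sumGo xs pref' (some best')

def sum_max_alt (arr : List Int) : Option Int :=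
  if arr.length < 2 then none
  else sumGo arr.tail (arr.headD 0) none

-- ===== PRECONDITION & SPEC =====
-- Pre_ excludes only the empty list, on which Python A recurses forever (RecursionError).
def Pre_sum_max (arr : List Int) : Prop := arr ≠ []
instance (arr : List Int) : Decidable (Pre_sum_max arr) := by unfold Pre_sum_max; infer_instance
def pvWitness_sum_max : List Int := [1, -2, 3]

def Spec_sum_max (arr : List Int) (out : Option Int) : Prop := out = sum_max_alt arr
instance (arr : List Int) (out : Option Int) : Decidable (Spec_sum_max arr out) := by unfold Spec_sum_max; infer_instance

-- ===== CLAIM (what is proved, stated in full; the proofs are below) =====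
def Claim_equal_sum_max : Prop := ∀ (arr : List Int), Dom_sum_max arr → Pre_sum_max arr → Spec_sum_max arr (sum_max arr)

-- ===== LEMMAS AND PROOFS =====

-- proof-side characterisation of B's loop
def omax (c : Int) : Option Int → Int
  | none => c
  | some b => max c b

def bf (p : Int) : List Int → Option Int
  | [] => none
  | x :: xs => some (omax (p + x * x) (bf (max p x) xs))

def mergeo : Option Int → Option Int → Option Int
  | b, none => b
  | b, some v => some (omax v b)

theorem mergeo_none (o : Option Int) : mergeo none o = o := by
  cases o <;> simp [mergeo, omax]

theorem sumGo_eq (xs : List Int) : ∀ (p : Int) (b : Option Int),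
    sumGo xs p b = mergeo b (bf p xs) := by
  induction xs with
  | nil => intro p b; cases b <;> simp [sumGo, bf, mergeo]
  | cons x xs ih =>
    intro p b
    have hp : (if x > p then x else p) = max p x := by omega
    have hb : (match b with | none => p + x * x | some v => if p + x * x > v then p + x * x else v)
        = omax (p + x * x) b := by
      cases b <;> simp [omax] <;> omega
    simp only [sumGo, hp, hb, ih, bf]
    cases hbf : bf (max p x) xs <;> cases b <;> simp [mergeo, omax] <;> omega

theorem foldl_max_max (xs : List Int) : ∀ (a b : Int),
    xs.foldl max (max a b) = max a (xs.foldl max b) := by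
  induction xs with
  | nil => intro a b; rfl
  | cons x xs ih =>
    intro a b
    simp only [List.foldl_cons, max_assoc, ih]

def sqf (a : Int) (xs : List Int) : Int := xs.foldl (fun m x => max m (x * x)) a

theorem sqf_max (xs : List Int) : ∀ (a b : Int),
    sqf (max a b) xs = max a (sqf b xs) := by
  induction xs with
  | nil => intro a b; rfl
  | cons x xs ih =>
    intro a b
    simp only [sqf, List.foldl_cons, max_assoc] at *
    exact ih a (max b (x * x))

theorem bf_char (xs : List Int) : ∀ (y p : Int),
    bf p (y :: xs) = some (omax (p + sqf (y * y) xs) (bf y xs)) := by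
  induction xs with
  | nil => intro y p; simp [bf, omax, sqf]
  | cons x xs ih =>
    intro y p
    have h1 : bf (max p y) (x :: xs) = some (omax ((max p y) + sqf (x * x) xs) (bf x xs)) := ih x (max p y)
    have h2 : bf y (x :: xs) = some (omax (y + sqf (x * x) xs) (bf x xs)) := ih x y
    have h3 : sqf (y * y) (x :: xs) = max (y * y) (sqf (x * x) xs) := by
      show sqf (max (y * y) (x * x)) xs = _
      exact sqf_max xs (y * y) (x * x)
    show some (omax (p + y * y) (bf (max p y) (x :: xs))) = _
    rw [h1, h2, h3]
    cases hbf : bf x xs <;> simp [omax] <;> omega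

theorem bf_append (xs : List Int) : ∀ (ys : List Int) (p : Int),
    bf p (xs ++ ys) = mergeo (bf p xs) (bf (xs.foldl max p) ys) := by
  induction xs with
  | nil => intro ys p; simp [bf, mergeo_none]
  | cons x xs ih =>
    intro ys p
    show some (omax (p + x * x) (bf (max p x) (xs ++ ys))) = _
    rw [ih ys (max p x)]
    show _ = mergeo (some (omax (p + x * x) (bf (max p x) xs))) (bf ((x :: xs).foldl max p) ys)
    have : (x :: xs).foldl max p = xs.foldl max (max p x) := rfl
    rw [this]
    cases h1 : bf (max p x) xs <;> cases h2 : bf (xs.foldl max (max p x)) ys <;>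
      simp [mergeo, omax] <;> omega

-- the mid split of a nonempty list, in take/drop form
theorem slice_mid_to (arr : List Int) :
    PySem.List.slice arr none (some (PySem.Int.floordiv (PySem.List.len arr) 2)) = arr.take (arr.length / 2) := by
  simp only [PySem.List.len_eq]
  rw [PySem.Int.floordiv_eq_ediv_of_pos (by norm_num), PySem.List.slice_to _ (by omega)]
  congr 1

theorem slice_mid_from (arr : List Int) :
    PySem.List.slice arr (some (PySem.Int.floordiv (PySem.List.len arr) 2)) none = arr.drop (arr.length / 2) := by
  simp only [PySem.List.len_eq]
  rw [PySem.Int.floordiv_eq_ediv_of_pos (by norm_num), PySem.List.slice_from _ (by omega)]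
  congr 1

theorem lin_eq (n : Nat) : ∀ (x : Int) (xs : List Int), xs.length < n →
    linear_max (x :: xs) = xs.foldl max x := by
  induction n with
  | zero => intro _ _ h; omega
  | succ n ih =>
    intro x xs hlen
    by_cases h1 : (x :: xs).length = 1
    · have : xs = [] := by cases xs <;> simp_all
      subst this; simp [linear_max]
    · rw [linear_max]
      simp only [h1, if_false, List.length_cons, Nat.succ_ne_zero, if_false]
      rw [slice_mid_to, slice_mid_from]
      have hxs : 1 ≤ xs.length := by cases xs <;> simp_all
      have hlen1 : (x :: xs).length = xs.length + 1 := by simp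
      set m := (x :: xs).length / 2 with hm
      have hm1 : 1 ≤ m ∧ m ≤ xs.length := by omega
      have htake : (x :: xs).take m = x :: xs.take (m - 1) := by
        cases hc : m with
        | zero => omega
        | succ k => simp
      have hdrop : (x :: xs).drop m = xs.drop (m - 1) := by
        cases hc : m with
        | zero => omega
        | succ k => simp
      obtain ⟨b, r', hr⟩ : ∃ b r', xs.drop (m - 1) = b :: r' := by
        cases h : xs.drop (m - 1) with
        | nil => exfalso; have := congrArg List.length h; simp at this; omega
        | cons b r' => exact ⟨b, r', rfl⟩
      have hrlen := congrArg List.length hr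
      simp only [List.length_drop, List.length_cons] at hrlen
      rw [htake, hdrop, hr]
      rw [ih x (xs.take (m - 1)) (by simp; omega), ih b r' (by omega)]
      have hsplit : xs = xs.take (m - 1) ++ (b :: r') := by rw [← hr, List.take_append_drop]
      conv_rhs => rw [hsplit]
      rw [List.foldl_append]
      show _ = r'.foldl max (max ((xs.take (m - 1)).foldl max x) b)
      rw [foldl_max_max]
      omega

theorem sq_eq (n : Nat) : ∀ (x : Int) (xs : List Int), xs.length < n →
    square_max (x :: xs) = sqf (x * x) xs := by
  induction n with
  | zero => intro _ _ h; omega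
  | succ n ih =>
    intro x xs hlen
    by_cases h1 : (x :: xs).length = 1
    · have : xs = [] := by cases xs <;> simp_all
      subst this; simp [square_max, sqf]; ring
    · rw [square_max]
      simp only [h1, if_false, List.length_cons, Nat.succ_ne_zero, if_false]
      rw [slice_mid_to, slice_mid_from]
      have hxs : 1 ≤ xs.length := by cases xs <;> simp_all
      have hlen1 : (x :: xs).length = xs.length + 1 := by simp
      set m := (x :: xs).length / 2 with hm
      have hm1 : 1 ≤ m ∧ m ≤ xs.length := by omega
      have htake : (x :: xs).take m = x :: xs.take (m - 1) := by
        cases hc : m with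
        | zero => omega
        | succ k => simp
      have hdrop : (x :: xs).drop m = xs.drop (m - 1) := by
        cases hc : m with
        | zero => omega
        | succ k => simp
      obtain ⟨b, r', hr⟩ : ∃ b r', xs.drop (m - 1) = b :: r' := by
        cases h : xs.drop (m - 1) with
        | nil => exfalso; have := congrArg List.length h; simp at this; omega
        | cons b r' => exact ⟨b, r', rfl⟩
      have hrlen := congrArg List.length hr
      simp only [List.length_drop, List.length_cons] at hrlen
      rw [htake, hdrop, hr]
      rw [ih x (xs.take (m - 1)) (by simp; omega), ih b r' (by omega)]
      have hsplit : xs = xs.take (m - 1) ++ (b :: r') := by rw [← hr, List.take_append_drop]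
      conv_rhs => rw [hsplit]
      have hdist : sqf (x * x) (xs.take (m - 1) ++ (b :: r'))
          = max (sqf (x * x) (xs.take (m - 1))) (sqf (b * b) r') := by
        have h0 : sqf (x * x) (xs.take (m - 1) ++ (b :: r'))
            = sqf (max (sqf (x * x) (xs.take (m - 1))) (b * b)) r' := by
          simp [sqf, List.foldl_append]
        rw [h0]
        exact sqf_max r' _ (b * b)
      rw [hdist]
      omega

theorem main_eq (n : Nat) : ∀ (x : Int) (xs : List Int), xs.length < n → xs ≠ [] →
    sum_max (x :: xs) = bf x xs := by
  induction n with
  | zero => intro _ _ h _; omega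
  | succ n ih =>
    intro x xs hlen hne
    have hxs : 1 ≤ xs.length := by cases xs <;> simp_all
    have h1 : ¬ (x :: xs).length = 1 := by simp; omega
    rw [sum_max]
    simp only [h1, if_false, List.length_cons, Nat.succ_ne_zero, if_false]
    rw [slice_mid_to, slice_mid_from]
    have hlen1 : (x :: xs).length = xs.length + 1 := by simp
    set m := (x :: xs).length / 2 with hm
    clear_value m
    have hm1 : 1 ≤ m ∧ m ≤ xs.length := by omega
    have htake : (x :: xs).take m = x :: xs.take (m - 1) := by
      cases hc : m with
      | zero => omega
      | succ k => simp
    have hdrop : (x :: xs).drop m = xs.drop (m - 1) := by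
      cases hc : m with
      | zero => omega
      | succ k => simp
    obtain ⟨b, r', hr⟩ : ∃ b r', xs.drop (m - 1) = b :: r' := by
      cases h : xs.drop (m - 1) with
      | nil => exfalso; have := congrArg List.length h; simp at this; omega
      | cons b r' => exact ⟨b, r', rfl⟩
    have hrlen := congrArg List.length hr
    simp only [List.length_drop, List.length_cons] at hrlen
    rw [htake, hdrop, hr]
    have hLsum : sum_max (x :: xs.take (m - 1)) = bf x (xs.take (m - 1)) := by
      by_cases htk : xs.take (m - 1) = []
      · rw [htk, sum_max]; simp [bf]
      · exact ih x (xs.take (m - 1)) (by simp; omega) htk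
    have hRsum : sum_max (b :: r') = bf b r' := by
      by_cases hr' : r' = []
      · rw [hr', sum_max]; simp [bf]
      · exact ih b r' (by omega) hr'
    have hLlin : linear_max (x :: xs.take (m - 1)) = (xs.take (m - 1)).foldl max x :=
      lin_eq (xs.length + 1) x _ (by simp; try omega)
    have hRsq : square_max (b :: r') = sqf (b * b) r' :=
      sq_eq (xs.length + 1) b r' (by omega)
    rw [hLsum, hRsum, hLlin, hRsq]
    have hsplit : xs = xs.take (m - 1) ++ (b :: r') := by rw [← hr, List.take_append_drop]
    conv_rhs => rw [hsplit]
    rw [bf_append, bf_char]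
    cases hA : bf x (xs.take (m - 1)) <;> cases hB : bf b r' <;>
      simp [mergeo, omax, hne] <;> omega

theorem sum_max_spec : Claim_equal_sum_max := by
  intro arr _ hpre
  unfold Spec_sum_max
  match arr with
  | [] => exact absurd rfl hpre
  | [x] => rw [sum_max]; simp [sum_max_alt]
  | x :: y :: xs =>
    rw [main_eq (xs.length + 2) x (y :: xs) (by simp) (by simp)]
    unfold sum_max_alt
    simp only [List.length_cons, List.tail_cons, List.headD_cons]
    rw [if_neg (by omega), sumGo_eq, mergeo_none]
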